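-- pv_equiv track=rewrite | github.com/janezd/advent-of-code | 2015/24 It Hangs in the Balance/solution_b.py | to_sum
-- ===== SOURCE A (Python) =====
-- def to_sum(a, b, total_a, total_b, i, remaining):
--     if i < len(remaining):
--         e = remaining[i]
--         if e <= total_a:
--             yield from to_sum(a + [e], b, total_a - e, total_b, i + 1, remaining)
--         if e <= total_b:
--             yield from to_sum(a, b + [e], total_a, total_b - e, i + 1, remaining)
--     else:
--         yield a, b
-- ===== SOURCE B (Python) =====
-- def to_sum(a, b, total_a, total_b, i, remaining):
--     n = len(remaining)
--     stack = [(a, b, total_a, total_b, i)]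
--     while stack:
--         a, b, ta, tb, j = stack.pop()
--         if j < n:
--             e = remaining[j]
--             # push the b-branch first so the a-branch is explored first (LIFO)
--             if e <= tb:
--                 stack.append((a, b + [e], ta, tb - e, j + 1))
--             if e <= ta:
--                 stack.append((a + [e], b, ta - e, tb, j + 1))
--         else:
--             yield (a, b)
-- ===== Notes on version B (the rewrite author's own statement) =====
-- stated objective: alternative
-- what changed: Replaces A's binary recursion with an iterative explicit-stack depth-first traversal (pushing the b-branch before the a-branch so the LIFO pop order reproduces A's yield order).
import Mathlib
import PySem

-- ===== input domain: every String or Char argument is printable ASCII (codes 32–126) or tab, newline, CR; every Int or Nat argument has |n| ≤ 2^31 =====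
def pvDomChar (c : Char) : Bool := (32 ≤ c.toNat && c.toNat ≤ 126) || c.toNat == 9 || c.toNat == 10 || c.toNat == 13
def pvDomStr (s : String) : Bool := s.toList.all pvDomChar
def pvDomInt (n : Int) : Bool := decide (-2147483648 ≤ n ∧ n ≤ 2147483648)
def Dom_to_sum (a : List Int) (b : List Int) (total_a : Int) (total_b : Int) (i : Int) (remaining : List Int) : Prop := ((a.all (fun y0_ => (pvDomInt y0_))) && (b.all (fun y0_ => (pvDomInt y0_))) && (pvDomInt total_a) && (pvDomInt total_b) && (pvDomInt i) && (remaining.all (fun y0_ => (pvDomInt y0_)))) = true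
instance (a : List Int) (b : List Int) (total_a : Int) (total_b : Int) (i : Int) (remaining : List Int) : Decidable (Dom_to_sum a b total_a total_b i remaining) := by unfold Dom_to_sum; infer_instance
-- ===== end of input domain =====

-- B replaces A's binary recursion with an explicit-stack iterative DFS (same cost, different decomposition).

-- ===== PORT A =====
-- Literal port of the recursive generator: the yielded sequence is the concatenation of the
-- a-branch results then the b-branch results; a leaf (i ≥ len) yields one pair. The Nat fuel
-- ((len - i).toNat, recomputed by the wrapper) only makes the recursion structural: fuel = 0
-- iff i ≥ len(remaining), so the fuel-0 case IS the Python 'else' branch.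
def to_sum_go (remaining : List Int) : Nat → List Int → List Int → Int → Int → Int → List (List Int × List Int)
  | 0, a, b, _, _, _ => [(a, b)]
  | fuel + 1, a, b, total_a, total_b, i =>
    match PySem.List.pyGet? remaining i with
    | none => []   -- IndexError in Python (i below -len): excluded by Pre_to_sum
    | some e =>
      (if e ≤ total_a then to_sum_go remaining fuel (a ++ [e]) b (total_a - e) total_b (i + 1) else []) ++
      (if e ≤ total_b then to_sum_go remaining fuel a (b ++ [e]) total_a (total_b - e) (i + 1) else [])

def to_sum (a : List Int) (b : List Int) (total_a : Int) (total_b : Int) (i : Int) (remaining : List Int) : List (List Int × List Int) :=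
  to_sum_go remaining ((remaining.length : Int) - i).toNat a b total_a total_b i

-- ===== PORT B =====
-- Source B's state tuple (a, b, total_a, total_b, i) and its explicit-stack while-loop, popping the
-- stack head; the b-branch is pushed before the a-branch so the a-branch is popped first. The
-- Nat fuel bounds the number of loop iterations (3^... dominates the two pushes per pop) and
-- only makes the loop structural; the fuel-exhausted case is unreachable from the wrapper.
def pvStackMeasure (n : Int) (st : List (List Int × List Int × Int × Int × Int)) : Nat :=
  (st.map (fun s => 3 ^ ((n - s.2.2.2.2).toNat + 1))).sum

def to_sum_loop (n : Int) (remaining : List Int) : Nat → List (List Int × List Int × Int × Int × Int) → List (List Int × List Int)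
  | _, [] => []
  | 0, _ => []
  | fuel + 1, (a, b, ta, tb, j) :: rest =>
    if j < n then
      match PySem.List.pyGet? remaining j with
      | none => to_sum_loop n remaining fuel rest   -- IndexError in Python: excluded by Pre_to_sum
      | some e =>
        to_sum_loop n remaining fuel
          ((if e ≤ ta then [(a ++ [e], b, ta - e, tb, j + 1)] else []) ++
           (if e ≤ tb then [(a, b ++ [e], ta, tb - e, j + 1)] else []) ++ rest)
    else
      (a, b) :: to_sum_loop n remaining fuel rest

def to_sum_alt (a : List Int) (b : List Int) (total_a : Int) (total_b : Int) (i : Int) (remaining : List Int) : List (List Int × List Int) :=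
  to_sum_loop (remaining.length : Int) remaining
    (pvStackMeasure (remaining.length : Int) [(a, b, total_a, total_b, i)])
    [(a, b, total_a, total_b, i)]

-- ===== PRECONDITION & SPEC =====
-- Pre_ excludes exactly the inputs where Python's remaining[i] raises IndexError (i below -len(remaining)).
def Pre_to_sum (a : List Int) (b : List Int) (total_a : Int) (total_b : Int) (i : Int) (remaining : List Int) : Prop :=
  -(remaining.length : Int) ≤ i
instance (a : List Int) (b : List Int) (total_a : Int) (total_b : Int) (i : Int) (remaining : List Int) : Decidable (Pre_to_sum a b total_a total_b i remaining) := by unfold Pre_to_sum; infer_instance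

def pvWitness_to_sum : List Int × List Int × Int × Int × Int × List Int := ([], [], 3, 3, 0, [1, 2])

def Spec_to_sum (a : List Int) (b : List Int) (total_a : Int) (total_b : Int) (i : Int) (remaining : List Int) (out : List (List Int × List Int)) : Prop := out = to_sum_alt a b total_a total_b i remaining
instance (a : List Int) (b : List Int) (total_a : Int) (total_b : Int) (i : Int) (remaining : List Int) (out : List (List Int × List Int)) : Decidable (Spec_to_sum a b total_a total_b i remaining out) := by unfold Spec_to_sum; infer_instance

-- ===== CLAIM (what is proved, stated in full; the proofs are below) =====
def Claim_equal_to_sum : Prop := ∀ (a : List Int) (b : List Int) (total_a : Int) (total_b : Int) (i : Int) (remaining : List Int), Dom_to_sum a b total_a total_b i remaining → Pre_to_sum a b total_a total_b i remaining → Spec_to_sum a b total_a total_b i remaining (to_sum a b total_a total_b i remaining)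

-- ===== LEMMAS AND PROOFS =====

-- A's recursion, unfolded one level with the wrapper's own fuel on the recursive calls.
theorem to_sum_unfold (a b : List Int) (ta tb i : Int) (remaining : List Int) :
    to_sum a b ta tb i remaining =
      if i < (remaining.length : Int) then
        match PySem.List.pyGet? remaining i with
        | none => []
        | some e =>
          (if e ≤ ta then to_sum (a ++ [e]) b (ta - e) tb (i + 1) remaining else []) ++
          (if e ≤ tb then to_sum a (b ++ [e]) ta (tb - e) (i + 1) remaining else [])
      else [(a, b)] := by
  by_cases h : i < (remaining.length : Int)
  · have hk : ((remaining.length : Int) - i).toNat = ((remaining.length : Int) - (i + 1)).toNat + 1 := by omega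
    simp only [to_sum, hk, to_sum_go, h, if_pos]
  · have hk : ((remaining.length : Int) - i).toNat = 0 := by omega
    simp only [to_sum, hk, to_sum_go, h, if_neg, not_false_iff]

-- The stack invariant: with enough fuel, the loop emits each frame's recursive result in order.
def pvFlat (remaining : List Int) (st : List (List Int × List Int × Int × Int × Int)) : List (List Int × List Int) :=
  (st.map (fun s => to_sum s.1 s.2.1 s.2.2.1 s.2.2.2.1 s.2.2.2.2 remaining)).flatten

theorem loop_flat (remaining : List Int) :
    ∀ (fuel : Nat) (st : List (List Int × List Int × Int × Int × Int)),
      pvStackMeasure (remaining.length : Int) st ≤ fuel →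
      to_sum_loop (remaining.length : Int) remaining fuel st = pvFlat remaining st := by
  intro fuel
  induction fuel with
  | zero =>
    intro st hst
    match st with
    | [] => rfl
    | (a, b, ta, tb, j) :: rest =>
      exfalso
      simp only [pvStackMeasure, List.map_cons, List.sum_cons] at hst
      have hp : 0 < 3 ^ (((remaining.length : Int) - j).toNat + 1) := Nat.pow_pos (by norm_num)
      omega
  | succ fuel ih =>
    intro st hst
    match st with
    | [] => rfl
    | (a, b, ta, tb, j) :: rest =>
      simp only [pvStackMeasure, List.map_cons, List.sum_cons] at hst
      by_cases hj : j < (remaining.length : Int)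
      · have hk : ((remaining.length : Int) - j).toNat = ((remaining.length : Int) - (j + 1)).toNat + 1 := by omega
        have h3 : 3 ^ (((remaining.length : Int) - j).toNat + 1)
            = 3 * 3 ^ (((remaining.length : Int) - (j + 1)).toNat + 1) := by rw [hk]; ring
        have hp : 0 < 3 ^ (((remaining.length : Int) - (j + 1)).toNat + 1) := Nat.pow_pos (by norm_num)
        cases hget : PySem.List.pyGet? remaining j with
        | none =>
          rw [to_sum_loop]
          simp only [hj, if_pos, hget]
          rw [ih rest (by simp only [pvStackMeasure]; omega)]
          simp only [pvFlat, List.map_cons, List.flatten_cons, to_sum_unfold a b ta tb j remaining,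
            hj, if_pos, hget, List.nil_append]
        | some e =>
          rw [to_sum_loop]
          simp only [hj, if_pos, hget]
          rw [ih _ (by
            simp only [pvStackMeasure, List.map_append, List.sum_append]
            split_ifs <;> simp only [List.map_cons, List.map_nil, List.sum_cons, List.sum_nil] <;> omega)]
          simp only [pvFlat, List.map_append, List.flatten_append, List.map_cons, List.flatten_cons,
            to_sum_unfold a b ta tb j remaining, hj, if_pos, hget]
          split_ifs <;> simp
      · rw [to_sum_loop]
        simp only [hj, if_neg, not_false_iff, if_false]
        rw [ih rest (by
          have hp : 0 < 3 ^ (((remaining.length : Int) - j).toNat) := Nat.pow_pos (by norm_num)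
          simp only [pvStackMeasure]
          omega)]
        simp only [pvFlat, List.map_cons, List.flatten_cons, to_sum_unfold a b ta tb j remaining,
          hj, if_neg, not_false_iff, if_false, List.singleton_append]

-- ===== VERDICT (by name: the statement is the Claim_ definition above) =====
theorem to_sum_spec : Claim_equal_to_sum := by
  intro a b ta tb i remaining _ _
  unfold Spec_to_sum to_sum_alt
  rw [loop_flat remaining _ _ le_rfl]
  simp [pvFlat]
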